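-- pv_equiv track=rewrite | github.com/LIMJIY00N/CodingTest | baekjoon/#2667.py | bfs
-- ===== SOURCE A (Python) =====
-- from collections import deque
--
-- def bfs(home,x,y):
--     visit = []
--     q = deque([])
--     q.append([x,y])
--     #상하 좌우 이므로, 상하죄우 체크할 dx와 dy
--     dx=[0,0,1,-1]
--     dy =[1,-1,0,0]
--
--     while q:
--         node = q.popleft()
--         x = node[0]
--         y = node[1]
--         #노드를 방문하지 않았다면 방문기록에 추가
--         if node not in visit:
--             visit.append(node)
--             #4번 for문 돌려서
--             for i in range(4):
--                 cx = x+dx[i]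
--                 cy = y+dy[i]
--                 #상하좌우 중, 집이 있는 땅이 있다면
--                 if [cx,cy] in home:
--                     #q에 해당 땅을 추가하기
--                     q.append([cx,cy])
--     return visit
-- ===== SOURCE B (Python) =====
-- def bfs(home, x, y):
--     # Pure level-by-level recursion: each round stages the next BFS level with
--     # full deduplication, and the answer is the concatenation of the levels.
--     def expand(level, seen):
--         nxt = []
--         for cx, cy in level:
--             for dx, dy in ((0, 1), (0, -1), (1, 0), (-1, 0)):
--                 n = [cx + dx, cy + dy]
--                 if n in home and n not in seen and n not in nxt:
--                     nxt.append(n)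
--         return nxt
--
--     def go(level, seen):
--         if not level:
--             return []
--         nxt = expand(level, seen)
--         return level + go(nxt, seen + nxt)
--
--     return go([[x, y]], [[x, y]])
-- ===== Notes on version B (the rewrite author's own statement) =====
-- stated objective: alternative
-- what changed: Replaces the single FIFO queue with pop-time deduplication by a pure recursion over BFS levels: each round stages the fully deduplicated next level and the result is the concatenation of the levels, with no membership check at processing time.
import Mathlib
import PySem

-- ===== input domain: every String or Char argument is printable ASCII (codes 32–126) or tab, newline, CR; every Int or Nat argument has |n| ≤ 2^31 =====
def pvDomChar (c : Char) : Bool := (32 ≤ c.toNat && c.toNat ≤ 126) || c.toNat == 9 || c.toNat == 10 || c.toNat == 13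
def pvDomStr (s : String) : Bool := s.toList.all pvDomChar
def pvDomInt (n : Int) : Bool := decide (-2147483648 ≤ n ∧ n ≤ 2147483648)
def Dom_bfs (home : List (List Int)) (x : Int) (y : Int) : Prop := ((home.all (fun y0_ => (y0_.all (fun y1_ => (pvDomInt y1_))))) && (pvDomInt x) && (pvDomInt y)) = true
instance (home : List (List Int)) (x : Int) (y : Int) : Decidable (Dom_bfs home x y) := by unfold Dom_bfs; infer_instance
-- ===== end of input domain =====

-- B replaces A's single FIFO queue (which admits duplicate entries and deduplicates at pop
-- time) by a pure recursion over BFS levels: each round stages the fully deduplicated next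
-- level, and the result is the concatenation of the levels; same return value.
-- Fuel parameters only totalize the loops; they are provably sufficient.

-- ===== PORT A =====
-- a queue/visit node [x,y] is carried as the pair (x,y); nodeL renders it back as the Python list
def nodeL (p : Int × Int) : List Int := [p.1, p.2]

def dxA : List Int := [0, 0, 1, -1]
def dyA : List Int := [1, -1, 0, 0]

-- the inner `for i in range(4)` loop of A: append in-home neighbours of (x,y) to the queue q
def pushA (home : List (List Int)) (x y : Int) (q : List (Int × Int)) : List (Int × Int) :=
  (List.range 4).foldl (fun acc i =>
    let cx := x + dxA.getD i 0
    let cy := y + dyA.getD i 0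
    if nodeL (cx, cy) ∈ home then acc ++ [(cx, cy)] else acc) q

-- A's `while q` loop: pop left, dedup at pop time
def bfsLoopA (home : List (List Int)) : Nat → List (Int × Int) → List (Int × Int) → List (Int × Int)
  | 0, visit, _ => visit
  | _ + 1, visit, [] => visit
  | fuel + 1, visit, n :: q' =>
      if n ∉ visit then
        bfsLoopA home fuel (visit ++ [n]) (pushA home n.1 n.2 q')
      else
        bfsLoopA home fuel visit q'

def bfs (home : List (List Int)) (x : Int) (y : Int) : List (List Int) :=
  (bfsLoopA home (5 * home.length + 7) [] [(x, y)]).map nodeL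

-- ===== PORT B =====
def dirsB : List (Int × Int) := [(0, 1), (0, -1), (1, 0), (-1, 0)]

-- the body of B's `for dx,dy in …` loop for one cell of the level
def expandNode (home : List (List Int)) (seen : List (Int × Int)) (nxt : List (Int × Int))
    (c : Int × Int) : List (Int × Int) :=
  dirsB.foldl (fun nxt d =>
    let n := (c.1 + d.1, c.2 + d.2)
    if nodeL n ∈ home ∧ n ∉ seen ∧ n ∉ nxt then nxt ++ [n] else nxt) nxt

-- B's `expand`: stage the next level, fully deduplicated
def expandB (home : List (List Int)) (level seen : List (Int × Int)) : List (Int × Int) :=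
  level.foldl (expandNode home seen) []

-- B's recursion `go` over the levels
def goB (home : List (List Int)) : Nat → List (Int × Int) → List (Int × Int) → List (Int × Int)
  | 0, _, _ => []
  | fuel + 1, level, seen =>
      if level.isEmpty then []
      else
        let nxt := expandB home level seen
        level ++ goB home fuel nxt (seen ++ nxt)

def bfs_alt (home : List (List Int)) (x : Int) (y : Int) : List (List Int) :=
  (goB home (home.length + 2) [(x, y)] [(x, y)]).map nodeL

-- ===== PRECONDITION & SPEC =====
def Spec_bfs (home : List (List Int)) (x : Int) (y : Int) (out : List (List Int)) : Prop := out = bfs_alt home x y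
instance (home : List (List Int)) (x : Int) (y : Int) (out : List (List Int)) : Decidable (Spec_bfs home x y out) := by unfold Spec_bfs; infer_instance

-- ===== CLAIM (what is proved, stated in full; the proofs are below) =====
def Claim_equal_bfs : Prop := ∀ (home : List (List Int)) (x : Int) (y : Int), Dom_bfs home x y → Spec_bfs home x y (bfs home x y)

-- ===== LEMMAS AND PROOFS =====

-- proof-side worklist loop: the growing visited list itself, scanned with an index,
-- with enqueue-time deduplication; intermediate between A's queue and B's levels
def pushW (home : List (List Int)) (cx cy : Int) (visit : List (Int × Int)) : List (Int × Int) :=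
  dirsB.foldl (fun v d =>
    let n := (cx + d.1, cy + d.2)
    if nodeL n ∈ home ∧ n ∉ v then v ++ [n] else v) visit

def bfsLoopW (home : List (List Int)) : Nat → List (Int × Int) → Nat → List (Int × Int)
  | 0, visit, _ => visit
  | fuel + 1, visit, i =>
      if h : i < visit.length then
        bfsLoopW home fuel (pushW home (visit[i].1) (visit[i].2) visit) (i + 1)
      else visit

-- filter a stream against an accumulating visited list, keeping first occurrences
def dedupF (V : List (Int × Int)) : List (Int × Int) → List (Int × Int)
  | [] => []
  | n :: rest => if n ∈ V then dedupF V rest else n :: dedupF (V ++ [n]) rest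

lemma dedupF_sub {V W : List (Int × Int)} (q : List (Int × Int))
    (hVW : ∀ p, p ∈ V ↔ p ∈ W) : dedupF V q = dedupF W q := by
  induction q generalizing V W with
  | nil => rfl
  | cons n rest ih =>
      simp only [dedupF]
      by_cases hn : n ∈ V
      · rw [if_pos hn, if_pos ((hVW n).1 hn)]; exact ih hVW
      · rw [if_neg hn, if_neg (fun h => hn ((hVW n).2 h))]
        congr 1
        exact ih (by intro p; simp [hVW p])

lemma dedupF_append (V : List (Int × Int)) (a b : List (Int × Int)) :
    dedupF V (a ++ b) = dedupF V a ++ dedupF (V ++ dedupF V a) b := by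
  induction a generalizing V with
  | nil => simp [dedupF]
  | cons n rest ih =>
      simp only [List.cons_append, dedupF]
      by_cases hn : n ∈ V
      · rw [if_pos hn, if_pos hn, ih]
      · rw [if_neg hn, if_neg hn]
        simp only [List.cons_append, ih]
        congr 2
        apply dedupF_sub
        intro p; simp [List.append_assoc]

-- the neighbour candidate list (x,y+1),(x,y-1),(x+1,y),(x-1,y) filtered by membership in home
def nbrs (home : List (List Int)) (x y : Int) : List (Int × Int) := pushA home x y []

lemma pushA_eq (home : List (List Int)) (x y : Int) (q : List (Int × Int)) :
    pushA home x y q = q ++ nbrs home x y := by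
  simp only [pushA, nbrs, List.range_succ, List.range_zero]
  simp only [List.foldl_append, List.foldl_cons, List.foldl_nil]
  split_ifs <;> simp

lemma foldl_filt (home : List (List Int)) (x y : Int) :
    ∀ (cands : List (Int × Int)) (acc : List (Int × Int)),
      cands.foldl (fun acc d =>
        if nodeL (x + d.1, y + d.2) ∈ home then acc ++ [(x + d.1, y + d.2)] else acc) acc
      = acc ++ cands.foldl (fun acc d =>
          if nodeL (x + d.1, y + d.2) ∈ home then acc ++ [(x + d.1, y + d.2)] else acc) [] := by
  intro cands
  induction cands with
  | nil => simp
  | cons e es ihe =>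
      intro acc
      simp only [List.foldl_cons]
      by_cases hh : nodeL (x + e.1, y + e.2) ∈ home
      · rw [if_pos hh, if_pos hh, ihe (acc ++ [(x + e.1, y + e.2)]),
          ihe ([] ++ [(x + e.1, y + e.2)])]
        simp
      · rw [if_neg hh, if_neg hh]
        exact ihe acc

lemma pushW_eq (home : List (List Int)) (x y : Int) (v : List (Int × Int)) :
    pushW home x y v = v ++ dedupF v (nbrs home x y) := by
  have key : ∀ (cands : List (Int × Int)) (v : List (Int × Int)),
      cands.foldl (fun v d =>
        let n := (x + d.1, y + d.2)
        if nodeL n ∈ home ∧ n ∉ v then v ++ [n] else v) v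
      = v ++ dedupF v (cands.foldl (fun acc d =>
          if nodeL (x + d.1, y + d.2) ∈ home then acc ++ [(x + d.1, y + d.2)] else acc) []) := by
    intro cands
    induction cands with
    | nil => intro v; simp [dedupF]
    | cons d rest ih =>
        intro v
        simp only [List.foldl_cons]
        by_cases hh : nodeL (x + d.1, y + d.2) ∈ home
        · rw [if_pos hh, foldl_filt home x y rest ([] ++ [(x + d.1, y + d.2)])]
          by_cases hv : (x + d.1, y + d.2) ∈ v
          · rw [if_neg (by simp [hv]), ih v]
            simp [dedupF, hv]
          · rw [if_pos ⟨hh, hv⟩, ih (v ++ [(x + d.1, y + d.2)])]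
            simp [dedupF, hv]
        · rw [if_neg (by simp [hh]), if_neg hh, ih v]
  have hkey := key dirsB v
  simp only [pushW]
  rw [hkey]
  congr 2

-- the finite universe every queue element lives in
def S0 (home : List (List Int)) (x y : Int) : Finset (Int × Int) :=
  insert (x, y) (home.filterMap (fun l => match l with
    | [a, b] => some ((a : Int), (b : Int))
    | _ => none)).toFinset

lemma mem_S0_of_home {home : List (List Int)} {x y a b : Int}
    (h : nodeL (a, b) ∈ home) : (a, b) ∈ S0 home x y := by
  simp only [S0, Finset.mem_insert, List.mem_toFinset, List.mem_filterMap]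
  right
  exact ⟨[a, b], h, rfl⟩

lemma mem_condappend {α : Type} {c : Prop} [Decidable c] {l : List α} {n p : α}
    (h : p ∈ (if c then l ++ [n] else l)) : p ∈ l ∨ (c ∧ p = n) := by
  split_ifs at h with hc
  · rcases List.mem_append.mp h with h | h
    · exact Or.inl h
    · exact Or.inr ⟨hc, by simpa using h⟩
  · exact Or.inl h

lemma nbrs_mem_S0 {home : List (List Int)} {x y cx cy : Int} {p : Int × Int}
    (h : p ∈ nbrs home cx cy) : p ∈ S0 home x y := by
  simp only [nbrs, pushA, List.range_succ, List.range_zero, List.nil_append,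
    List.foldl_append, List.foldl_cons, List.foldl_nil,
    dxA, dyA, List.getD_cons_zero, List.getD_cons_succ] at h
  rcases mem_condappend h with h | ⟨hc, rfl⟩
  · rcases mem_condappend h with h | ⟨hc, rfl⟩
    · rcases mem_condappend h with h | ⟨hc, rfl⟩
      · rcases mem_condappend h with h | ⟨hc, rfl⟩
        · simp at h
        · exact mem_S0_of_home hc
      · exact mem_S0_of_home hc
    · exact mem_S0_of_home hc
  · exact mem_S0_of_home hc

lemma card_S0_le (home : List (List Int)) (x y : Int) :
    (S0 home x y).card ≤ home.length + 1 := by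
  classical
  have h1 : (S0 home x y).card ≤ (home.filterMap (fun l => match l with
      | [a, b] => some ((a : Int), (b : Int))
      | _ => none)).toFinset.card + 1 := Finset.card_insert_le _ _
  have h2 : (home.filterMap (fun l => match l with
      | [a, b] => some ((a : Int), (b : Int))
      | _ => none)).toFinset.card ≤ home.length := by
    calc _ ≤ (home.filterMap _).length := List.toFinset_card_le _
      _ ≤ home.length := List.length_filterMap_le _ _
  omega

-- simulation 1: A's queue state (V, q) corresponds to worklist state (V ++ dedupF V q, |V|)
lemma sim (home : List (List Int)) (x y : Int) :
    ∀ (μ : Nat) (V q : List (Int × Int)) (fa fb : Nat),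
      (∀ p ∈ q, p ∈ S0 home x y) →
      5 * ((S0 home x y) \ V.toFinset).card + q.length ≤ μ →
      μ ≤ fa →
      ((S0 home x y) \ V.toFinset).card + 1 ≤ fb →
      bfsLoopA home fa V q = bfsLoopW home fb (V ++ dedupF V q) V.length := by
  intro μ
  induction μ using Nat.strong_induction_on with
  | _ μ ih =>
    intro V q fa fb hq hμ hfa hfb
    match q with
    | [] =>
        simp only [dedupF, List.append_nil]
        have hA : bfsLoopA home fa V [] = V := by
          match fa with
          | 0 => rfl
          | _ + 1 => rfl
        have hB : bfsLoopW home fb V V.length = V := by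
          match fb with
          | 0 => rfl
          | f + 1 => simp [bfsLoopW]
        rw [hA, hB]
    | n :: rest =>
        have hlq : (n :: rest).length = rest.length + 1 := rfl
        have hfa1 : 1 ≤ fa := by omega
        match fa, hfa1 with
        | fa + 1, _ =>
        by_cases hn : n ∈ V
        · -- A skips a visited node; the worklist state is unchanged
          have hA : bfsLoopA home (fa + 1) V (n :: rest) = bfsLoopA home fa V rest := by
            simp [bfsLoopA, hn]
          have hd : dedupF V (n :: rest) = dedupF V rest := by simp [dedupF, hn]
          rw [hA, hd]
          exact ih (μ - 1) (by omega) V rest fa fb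
            (fun p hp => hq p (by simp [hp])) (by omega) (by omega) hfb
        · -- A visits n and pushes its neighbours; the worklist processes index |V| (= n)
          have hnS : n ∈ S0 home x y := hq n (by simp)
          have hcard : 1 ≤ ((S0 home x y) \ V.toFinset).card := by
            refine Finset.card_pos.mpr ⟨n, ?_⟩
            simp [Finset.mem_sdiff, hnS, hn]
          have hA : bfsLoopA home (fa + 1) V (n :: rest)
              = bfsLoopA home fa (V ++ [n]) (pushA home n.1 n.2 rest) := by
            simp [bfsLoopA, hn]
          rw [hA, pushA_eq]
          have hded : dedupF V (n :: rest) = n :: dedupF (V ++ [n]) rest := by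
            simp [dedupF, hn]
          rw [hded]
          have hfb1 : 1 ≤ fb := by omega
          match fb, hfb1 with
          | fb + 1, _ =>
          have hlen : V.length < (V ++ n :: dedupF (V ++ [n]) rest).length := by
            simp
          rw [bfsLoopW, dif_pos hlen]
          have hget : (V ++ n :: dedupF (V ++ [n]) rest)[V.length] = n := by
            rw [List.getElem_append_right (le_refl _)]
            simp
          rw [hget, pushW_eq]
          have hstate :
              (V ++ n :: dedupF (V ++ [n]) rest) ++
                dedupF (V ++ n :: dedupF (V ++ [n]) rest) (nbrs home n.1 n.2)
              = (V ++ [n]) ++ dedupF (V ++ [n]) (rest ++ nbrs home n.1 n.2) := by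
            rw [dedupF_append]
            have : V ++ n :: dedupF (V ++ [n]) rest
                = (V ++ [n]) ++ dedupF (V ++ [n]) rest := by simp
            rw [this]
            simp [List.append_assoc]
          rw [hstate]
          have hlen2 : V.length + 1 = (V ++ [n]).length := by simp
          rw [hlen2]
          have hcard' : ((S0 home x y) \ (V ++ [n]).toFinset).card
              = ((S0 home x y) \ V.toFinset).card - 1 := by
            classical
            have : (S0 home x y) \ (V ++ [n]).toFinset
                = ((S0 home x y) \ V.toFinset).erase n := by
              ext p
              simp [Finset.mem_sdiff, Finset.mem_erase, List.mem_toFinset]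
              tauto
            rw [this, Finset.card_erase_of_mem (by simp [Finset.mem_sdiff, hnS, hn])]
          have hnbrslen : (nbrs home n.1 n.2).length ≤ 4 := by
            simp only [nbrs, pushA, List.range_succ, List.range_zero]
            simp only [List.foldl_append, List.foldl_cons, List.foldl_nil]
            split_ifs <;> simp
          refine ih (μ - 2) (by omega) (V ++ [n]) (rest ++ nbrs home n.1 n.2) fa fb ?_ ?_ (by omega) ?_
          · intro p hp
            rcases List.mem_append.mp hp with h | h
            · exact hq p (by simp [h])
            · exact nbrs_mem_S0 h
          · have := hcard'
            have h1 : (rest ++ nbrs home n.1 n.2).length = rest.length + (nbrs home n.1 n.2).length := List.length_append ..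
            omega
          · omega

-- the worklist push from a state seen ++ nxt is B's expandNode on the nxt part
lemma expandNode_shift (home : List (List Int)) (c : Int × Int)
    (seen nxt : List (Int × Int)) :
    pushW home c.1 c.2 (seen ++ nxt) = seen ++ expandNode home seen nxt c := by
  have key : ∀ (cands : List (Int × Int)) (nxt : List (Int × Int)),
      cands.foldl (fun v d =>
        let n := (c.1 + d.1, c.2 + d.2)
        if nodeL n ∈ home ∧ n ∉ v then v ++ [n] else v) (seen ++ nxt)
      = seen ++ cands.foldl (fun nxt d =>
          let n := (c.1 + d.1, c.2 + d.2)
          if nodeL n ∈ home ∧ n ∉ seen ∧ n ∉ nxt then nxt ++ [n] else nxt) nxt := by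
    intro cands
    induction cands with
    | nil => intro nxt; rfl
    | cons d rest ih =>
        intro nxt
        simp only [List.foldl_cons]
        by_cases hh : nodeL (c.1 + d.1, c.2 + d.2) ∈ home ∧
            (c.1 + d.1, c.2 + d.2) ∉ seen ∧ (c.1 + d.1, c.2 + d.2) ∉ nxt
        · rw [if_pos hh, if_pos ⟨hh.1, by simp [hh.2.1, hh.2.2]⟩, List.append_assoc]
          exact ih (nxt ++ [(c.1 + d.1, c.2 + d.2)])
        · have : ¬ (nodeL (c.1 + d.1, c.2 + d.2) ∈ home ∧
              (c.1 + d.1, c.2 + d.2) ∉ seen ++ nxt) := by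
            simp only [List.mem_append] at *
            tauto
          rw [if_neg this, if_neg hh]
          exact ih nxt
  exact key dirsB nxt

-- processing one whole level in the worklist is one `expand` pass of B
lemma procLevel (home : List (List Int)) :
    ∀ (rem : List (Int × Int)) (seen nxt : List (Int × Int)) (fb i : Nat),
      seen.drop i = rem → i + rem.length = seen.length → rem.length ≤ fb →
      bfsLoopW home fb (seen ++ nxt) i
        = bfsLoopW home (fb - rem.length) (seen ++ rem.foldl (expandNode home seen) nxt) (i + rem.length) := by
  intro rem
  induction rem with
  | nil => intro seen nxt fb i _ _ _; simp
  | cons c rest ih =>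
      intro seen nxt fb i hdrop hlen hfb
      have hfb1 : 1 ≤ fb := by simp only [List.length_cons] at hfb; omega
      match fb, hfb1 with
      | fb + 1, _ =>
      have hi : i < seen.length := by
        have : rest.length + 1 = (c :: rest).length := rfl
        omega
      have hi' : i < (seen ++ nxt).length := by
        simp; omega
      rw [bfsLoopW, dif_pos hi']
      have hq0 : seen[i]? = some c := by
        rw [show i = i + 0 by omega, ← List.getElem?_drop, hdrop]
        rfl
      have hget : (seen ++ nxt)[i] = c := by
        rw [List.getElem_append_left hi]
        have h' : seen[i]? = some (seen[i]'hi) := List.getElem?_eq_getElem hi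
        rw [hq0] at h'
        exact (Option.some_injective _ h').symm
      rw [hget, expandNode_shift]
      have hdrop' : seen.drop (i + 1) = rest := by
        have h0 := congrArg List.tail hdrop
        rw [List.tail_drop] at h0
        simpa using h0
      have hlen' : i + 1 + rest.length = seen.length := by
        have h0 : i + (c :: rest).length = seen.length := hlen
        simp only [List.length_cons] at h0
        omega
      have hfb' : rest.length ≤ fb := by
        have h0 : (c :: rest).length ≤ fb + 1 := hfb
        simp only [List.length_cons] at h0
        omega
      have := ih seen (expandNode home seen nxt c) fb (i + 1) hdrop' hlen' hfb'
      rw [this]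
      have h1 : fb + 1 - (c :: rest).length = fb - rest.length := by
        simp only [List.length_cons]; omega
      have h2 : i + (c :: rest).length = i + 1 + rest.length := by
        simp only [List.length_cons]; omega
      rw [h1, h2]
      simp [List.foldl_cons]

-- invariant of B's expand: staged cells are fresh, distinct, and home cells
lemma expandNode_inv (home : List (List Int)) (seen nxt : List (Int × Int)) (c : Int × Int)
    (h : nxt.Nodup ∧ ∀ p ∈ nxt, p ∉ seen ∧ nodeL p ∈ home) :
    (expandNode home seen nxt c).Nodup ∧
      ∀ p ∈ expandNode home seen nxt c, p ∉ seen ∧ nodeL p ∈ home := by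
  have key : ∀ (cands : List (Int × Int)) (nxt : List (Int × Int)),
      nxt.Nodup → (∀ p ∈ nxt, p ∉ seen ∧ nodeL p ∈ home) →
      (cands.foldl (fun nxt d =>
          let n := (c.1 + d.1, c.2 + d.2)
          if nodeL n ∈ home ∧ n ∉ seen ∧ n ∉ nxt then nxt ++ [n] else nxt) nxt).Nodup ∧
      ∀ p ∈ cands.foldl (fun nxt d =>
          let n := (c.1 + d.1, c.2 + d.2)
          if nodeL n ∈ home ∧ n ∉ seen ∧ n ∉ nxt then nxt ++ [n] else nxt) nxt,
        p ∉ seen ∧ nodeL p ∈ home := by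
    intro cands
    induction cands with
    | nil => intro nxt h1 h2; exact ⟨h1, h2⟩
    | cons d rest ih =>
        intro nxt h1 h2
        simp only [List.foldl_cons]
        by_cases hh : nodeL (c.1 + d.1, c.2 + d.2) ∈ home ∧
            (c.1 + d.1, c.2 + d.2) ∉ seen ∧ (c.1 + d.1, c.2 + d.2) ∉ nxt
        · rw [if_pos hh]
          refine ih _ ?_ ?_
          · rw [List.nodup_append]
            refine ⟨h1, by simp, ?_⟩
            intro p hp b hb
            simp only [List.mem_singleton] at hb
            subst hb
            exact fun hEq => hh.2.2 (hEq ▸ hp)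
          · intro p hp
            rcases List.mem_append.mp hp with hp | hp
            · exact h2 p hp
            · simp at hp; subst hp; exact ⟨hh.2.1, hh.1⟩
        · rw [if_neg hh]; exact ih nxt h1 h2
  exact key dirsB nxt h.1 h.2

lemma expandB_inv (home : List (List Int)) (level seen : List (Int × Int)) :
    (expandB home level seen).Nodup ∧
      ∀ p ∈ expandB home level seen, p ∉ seen ∧ nodeL p ∈ home := by
  have key : ∀ (lvl nxt : List (Int × Int)),
      nxt.Nodup → (∀ p ∈ nxt, p ∉ seen ∧ nodeL p ∈ home) →
      (lvl.foldl (expandNode home seen) nxt).Nodup ∧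
        ∀ p ∈ lvl.foldl (expandNode home seen) nxt, p ∉ seen ∧ nodeL p ∈ home := by
    intro lvl
    induction lvl with
    | nil => intro nxt h1 h2; exact ⟨h1, h2⟩
    | cons c rest ih =>
        intro nxt h1 h2
        simp only [List.foldl_cons]
        have := expandNode_inv home seen nxt c ⟨h1, h2⟩
        exact ih _ this.1 this.2
  exact key level [] List.nodup_nil (by simp)

-- simulation 2: the worklist from a level boundary is B's level recursion
lemma outer (home : List (List Int)) (x y : Int) :
    ∀ (f : Nat) (level seen : List (Int × Int)) (fb i : Nat),
      seen.drop i = level → i + level.length = seen.length →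
      seen.Nodup → (∀ p ∈ seen, p ∈ S0 home x y) →
      ((S0 home x y) \ seen.toFinset).card + level.length ≤ fb →
      (level ≠ [] → (S0 home x y \ seen.toFinset).card + 1 ≤ f) →
      bfsLoopW home fb seen i = seen.take i ++ goB home f level seen := by
  intro f
  induction f with
  | zero =>
      intro level seen fb i hdrop hlen hnd hsub hfb hf
      have hlv : level = [] := by
        by_contra h
        have := hf h
        omega
      subst hlv
      have hi : i = seen.length := by simpa using hlen
      have hW : bfsLoopW home fb seen i = seen := by
        match fb with
        | 0 => rfl
        | fb + 1 => rw [bfsLoopW, dif_neg (by omega)]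
      rw [hW, goB]
      simp [hi]
  | succ f ih =>
      intro level seen fb i hdrop hlen hnd hsub hfb hf
      by_cases hlv : level = []
      · subst hlv
        have hi : i = seen.length := by simpa using hlen
        have hW : bfsLoopW home fb seen i = seen := by
          match fb with
          | 0 => rfl
          | fb + 1 => rw [bfsLoopW, dif_neg (by omega)]
        rw [hW, goB]
        simp [hi]
      · -- one level round
        set nxt := expandB home level seen with hnxt
        have hinv := expandB_inv home level seen
        have hproc := procLevel home level seen [] fb i hdrop hlen (by omega)
        rw [List.append_nil] at hproc
        have hproc2 : bfsLoopW home fb seen i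
            = bfsLoopW home (fb - level.length) (seen ++ nxt) (i + level.length) := by
          rw [hproc]; rfl
        rw [hproc2]
        have hgo : goB home (f + 1) level seen = level ++ goB home f nxt (seen ++ nxt) := by
          rw [goB, if_neg (by simpa [List.isEmpty_iff] using hlv)]
        rw [hgo]
        -- set up the recursive call
        have hsubnxt : ∀ p ∈ nxt, p ∈ S0 home x y := by
          intro p hp
          have := (hinv.2 p hp).2
          exact mem_S0_of_home (a := p.1) (b := p.2) (by simpa [nodeL] using this)
        have hnd2 : (seen ++ nxt).Nodup := by
          rw [List.nodup_append]
          refine ⟨hnd, hinv.1, ?_⟩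
          intro p hp q hq
          exact fun hEq => (hinv.2 q hq).1 (hEq ▸ hp)
        have hcard2 : ((S0 home x y) \ (seen ++ nxt).toFinset).card + nxt.length
            = ((S0 home x y) \ seen.toFinset).card := by
          classical
          have hsplit : (S0 home x y) \ seen.toFinset
              = ((S0 home x y) \ (seen ++ nxt).toFinset) ∪ nxt.toFinset := by
            ext p
            simp only [Finset.mem_sdiff, Finset.mem_union, List.toFinset_append,
              Finset.mem_union, List.mem_toFinset]
            constructor
            · intro ⟨h1, h2⟩
              by_cases hp : p ∈ nxt
              · exact Or.inr hp
              · exact Or.inl ⟨h1, by tauto⟩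
            · rintro (⟨h1, h2⟩ | hp)
              · exact ⟨h1, by tauto⟩
              · exact ⟨hsubnxt p hp, (hinv.2 p hp).1⟩
          have hdisj : Disjoint ((S0 home x y) \ (seen ++ nxt).toFinset) nxt.toFinset := by
            rw [Finset.disjoint_left]
            intro p hp hq
            simp only [Finset.mem_sdiff, List.toFinset_append, Finset.mem_union,
              List.mem_toFinset] at hp
            exact hp.2 (Or.inr (by simpa using hq))
          have hcardnxt : nxt.toFinset.card = nxt.length :=
            List.toFinset_card_of_nodup hinv.1
          have := Finset.card_union_of_disjoint hdisj
          rw [← hsplit] at this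
          omega
        have hlen3 : nxt.length ≤ ((S0 home x y) \ seen.toFinset).card := by
          classical
          have : nxt.toFinset ⊆ (S0 home x y) \ seen.toFinset := by
            intro p hp
            simp only [List.mem_toFinset] at hp
            simp only [Finset.mem_sdiff, List.mem_toFinset]
            exact ⟨hsubnxt p hp, (hinv.2 p hp).1⟩
          have hc := Finset.card_le_card this
          rw [List.toFinset_card_of_nodup hinv.1] at hc
          exact hc
        have hrec := ih nxt (seen ++ nxt) (fb - level.length) (i + level.length)
          (by
            have : i + level.length = seen.length := hlen
            rw [this]
            simp)
          (by simp; omega)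
          hnd2
          (by
            intro p hp
            rcases List.mem_append.mp hp with h | h
            · exact hsub p h
            · exact hsubnxt p h)
          (by omega)
          (by
            intro hne
            have hf2 := hf hlv
            have h1 : 1 ≤ nxt.length := by
              rcases nxt with _ | ⟨a, l⟩
              · exact absurd rfl hne
              · simp
            omega)
        rw [hrec]
        have htake : (seen ++ nxt).take (i + level.length)
            = seen.take i ++ level := by
          have : i + level.length = seen.length := hlen
          rw [this, List.take_append_of_le_length (le_refl _)]
          simp only [List.take_length]
          conv_lhs => rw [← List.take_append_drop i seen, hdrop]
        rw [htake, List.append_assoc]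

-- ===== VERDICT (by name: the statement is the Claim_ definition above) =====
theorem bfs_spec : Claim_equal_bfs := by
  intro home x y _
  unfold Spec_bfs bfs bfs_alt
  have hcard := card_S0_le home x y
  have h := sim home x y (5 * (S0 home x y).card + 1) [] [(x, y)]
    (5 * home.length + 7) (home.length + 2)
    (fun p hp => by simp at hp; subst hp; simp [S0])
    (by simp) (by omega) (by simp; omega)
  have h2 := outer home x y (home.length + 2) [(x, y)] [(x, y)]
    (home.length + 2) 0
    (by simp) (by simp) (by simp) (fun p hp => by simp at hp; subst hp; simp [S0])
    (by
      have : ((S0 home x y) \ [(x, y)].toFinset).card ≤ (S0 home x y).card :=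
        Finset.card_le_card (Finset.sdiff_subset)
      simp only [List.length_cons, List.length_nil]
      omega)
    (by
      intro _
      have : ((S0 home x y) \ [(x, y)].toFinset).card ≤ (S0 home x y).card :=
        Finset.card_le_card (Finset.sdiff_subset)
      omega)
  rw [h]
  have e1 : ([] : List (Int × Int)) ++ dedupF [] [(x, y)] = [(x, y)] := by
    simp [dedupF]
  rw [e1]
  simp only [List.length_nil]
  rw [h2]
  simp
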